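-- pv_equiv track=rewrite | github.com/DaveGerson/agent-baton | agent_baton/core/engine/foresight.py | _resolve_agent
-- ===== SOURCE A (Python) =====
-- def _resolve_agent(
--     preferred: str,
--     existing_agents: list[str] | None,
-- ) -> str:
--     """Resolve the preferred agent to a routed variant if available.
--
--     If the exact preferred agent is in the existing roster, use it.
--     If a flavored variant exists (e.g., backend-engineer--python),
--     use that instead.
--     """
--     if not existing_agents:
--         return preferred
--     # Exact match
--     if preferred in existing_agents:
--         return preferred
--     # Flavored match
--     for agent in existing_agents:
--         if agent.split("--")[0] == preferred:
--             return agent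
--     return preferred
-- ===== SOURCE B (Python) =====
-- def _resolve_agent(
--     preferred: str,
--     existing_agents: list[str] | None,
-- ) -> str:
--     """Single pass: return on exact match immediately; remember the first
--     flavored variant and fall back to it (else to preferred) after the loop."""
--     flavored = None
--     for agent in existing_agents or []:
--         if agent == preferred:
--             return preferred
--         if flavored is None and agent.split("--")[0] == preferred:
--             flavored = agent
--     return flavored if flavored is not None else preferred
-- ===== Notes on version B (the rewrite author's own statement) =====
-- stated objective: alternative
-- what changed: Replaces the membership test plus a separate flavored-variant scan with one loop that returns immediately on an exact match and records the first flavored candidate in an accumulator, resolved after the loop.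
import Mathlib
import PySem

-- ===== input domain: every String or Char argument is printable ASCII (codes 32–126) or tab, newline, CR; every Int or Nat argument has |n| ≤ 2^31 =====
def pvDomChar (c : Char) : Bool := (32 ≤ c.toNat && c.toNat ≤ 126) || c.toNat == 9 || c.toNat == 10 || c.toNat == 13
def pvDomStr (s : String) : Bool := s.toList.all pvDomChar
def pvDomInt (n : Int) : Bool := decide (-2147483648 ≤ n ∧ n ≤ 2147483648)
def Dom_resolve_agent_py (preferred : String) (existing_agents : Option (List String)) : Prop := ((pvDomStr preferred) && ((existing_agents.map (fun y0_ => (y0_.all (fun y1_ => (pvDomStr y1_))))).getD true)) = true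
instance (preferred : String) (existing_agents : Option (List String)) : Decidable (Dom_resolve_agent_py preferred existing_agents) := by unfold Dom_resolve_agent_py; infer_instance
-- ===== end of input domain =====

-- B resolves the agent in one pass (exact match returns at once; the first flavored
-- candidate is remembered in an accumulator) instead of A's membership test followed
-- by a separate flavored scan; an alternative decomposition, same complexity.


-- ===== PORT A =====
-- A's flavored loop: return the first agent whose first "--" token equals preferred.
def pvAFlavor (preferred : String) : List String → String
  | [] => preferred
  | a :: rest =>
      -- agent.split("--")[0]: split? with a nonempty separator is some and nonempty,
      -- so the [0] indexing is exactly headD.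
      if ((PySem.Str.split? a "--").getD []).headD "" = preferred then a
      else pvAFlavor preferred rest

def resolve_agent_py (preferred : String) (existing_agents : Option (List String)) : String :=
  match existing_agents with
  | none => preferred
  | some l =>
      if l.isEmpty then preferred                 -- 'if not existing_agents'
      else if preferred ∈ l then preferred        -- exact match
      else pvAFlavor preferred l                  -- flavored match

-- ===== PORT B =====
-- B's single loop, carrying the first flavored candidate as an Option accumulator.
def pvBLoop (preferred : String) (flavored : Option String) : List String → String
  | [] => flavored.getD preferred
  | a :: rest =>
      if a = preferred then preferred
      else
        pvBLoop preferred
          (if flavored = none ∧ ((PySem.Str.split? a "--").getD []).headD "" = preferred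
           then some a else flavored) rest

def resolve_agent_py_alt (preferred : String) (existing_agents : Option (List String)) : String :=
  pvBLoop preferred none (existing_agents.getD [])

-- ===== PRECONDITION & SPEC =====
def Spec_resolve_agent_py (preferred : String) (existing_agents : Option (List String)) (out : String) : Prop := out = resolve_agent_py_alt preferred existing_agents
instance (preferred : String) (existing_agents : Option (List String)) (out : String) : Decidable (Spec_resolve_agent_py preferred existing_agents out) := by unfold Spec_resolve_agent_py; infer_instance

-- ===== CLAIM (what is proved, stated in full; the proofs are below) =====
def Claim_equal_resolve_agent_py : Prop := ∀ (preferred : String) (existing_agents : Option (List String)), Dom_resolve_agent_py preferred existing_agents → Spec_resolve_agent_py preferred existing_agents (resolve_agent_py preferred existing_agents)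

-- ===== LEMMAS AND PROOFS =====

-- Invariant of B's loop: if preferred occurs in the rest of the list it wins;
-- otherwise a recorded candidate wins; otherwise A's flavored scan of the rest.
theorem pvBLoop_eq (preferred : String) (flav : Option String) (l : List String) :
    pvBLoop preferred flav l =
      if preferred ∈ l then preferred
      else match flav with
        | some f => f
        | none => pvAFlavor preferred l := by
  induction l generalizing flav with
  | nil => cases flav <;> simp [pvBLoop, pvAFlavor]
  | cons a rest ih =>
      by_cases ha : a = preferred
      · subst ha
        simp [pvBLoop]
      · rw [pvBLoop, if_neg ha, ih]
        by_cases hr : preferred ∈ rest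
        · rw [if_pos hr, if_pos (List.mem_cons_of_mem a hr)]
        · have hna : preferred ∉ a :: rest := by
            intro h
            rcases List.mem_cons.mp h with h | h
            · exact ha h.symm
            · exact hr h
          rw [if_neg hr, if_neg hna]
          cases flav with
          | some f => rw [if_neg (fun h => Option.some_ne_none f h.1)]
          | none =>
              rw [pvAFlavor]
              by_cases hp : ((PySem.Str.split? a "--").getD []).headD "" = preferred
              · rw [if_pos ⟨rfl, hp⟩, if_pos hp]
              · rw [if_neg (fun h => hp h.2), if_neg hp]

-- ===== VERDICT (by name: the statement is the Claim_ definition above) =====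
theorem resolve_agent_py_spec : Claim_equal_resolve_agent_py := by
  intro preferred existing_agents _
  unfold Spec_resolve_agent_py resolve_agent_py resolve_agent_py_alt
  cases existing_agents with
  | none => simp [pvBLoop]
  | some l =>
      rw [Option.getD_some, pvBLoop_eq]
      cases l with
      | nil => simp [pvAFlavor]
      | cons a rest => simp
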